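-- pv_equiv track=rewrite | github.com/ds5500/project-Samee-Mushtak-25 | eda/manual_alignment/naive_aligner.py | reverse_complement_regex
-- ===== SOURCE A (Python) =====
-- def reverse_complement_regex(seq:str):
--     # Consider allowing at most one non-Watson-Crick base pair (G-U)
--     # If parameter strict=True is given to function
--     rev_comp = ''
--     for base in reversed(seq):
--         match base:
--             case 'A':
--                 rev_comp = rev_comp + 'U'
--             case 'U':
--                 rev_comp = rev_comp + '(A|G)'
--             case 'C':
--                 rev_comp = rev_comp + 'G'
--             case 'G':
--                 rev_comp = rev_comp + '(C|U)'
--             case _: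
--                 return None
--     return rev_comp
-- ===== SOURCE B (Python) =====
-- COMP = {'A': 'U', 'U': '(A|G)', 'C': 'G', 'G': '(C|U)'}
--
-- def reverse_complement_regex(seq: str):
--     # Divide and conquer: rc(xy) = rc(y) + rc(x); base cases '' and a single base.
--     if len(seq) == 0:
--         return ''
--     if len(seq) == 1:
--         return COMP.get(seq)
--     m = len(seq) // 2
--     left = reverse_complement_regex(seq[:m])
--     right = reverse_complement_regex(seq[m:])
--     if left is None or right is None:
--         return None
--     return right + left
-- ===== Notes on version B (the rewrite author's own statement) =====
-- stated objective: alternative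
-- what changed: B replaces A's single reversed-iteration accumulator loop (early return inside a match) by a divide-and-conquer recursion rc(xy) = rc(y) + rc(x) on string halves, with a dict lookup as the single-base base case; correct because reversal anti-distributes over concatenation and each base is complemented independently.
import Mathlib
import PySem

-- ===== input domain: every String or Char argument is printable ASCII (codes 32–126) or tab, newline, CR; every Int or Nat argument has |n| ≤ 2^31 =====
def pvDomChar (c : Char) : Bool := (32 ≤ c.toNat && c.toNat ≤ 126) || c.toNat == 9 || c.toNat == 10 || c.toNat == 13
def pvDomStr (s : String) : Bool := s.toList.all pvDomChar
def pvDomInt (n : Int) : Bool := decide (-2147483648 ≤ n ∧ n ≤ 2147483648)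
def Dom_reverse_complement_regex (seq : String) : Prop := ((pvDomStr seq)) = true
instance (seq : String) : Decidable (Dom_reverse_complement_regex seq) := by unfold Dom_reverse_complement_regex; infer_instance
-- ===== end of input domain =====

-- B replaces A's reversed single-pass accumulator loop by a divide-and-conquer recursion rc(xy) = rc(y) + rc(x) (objective: alternative).
-- ===== PORT A =====
-- A's loop over reversed(seq): accumulator rev_comp, early return None on any other base.
def pvALoop : List Char → String → Option String
  | [], acc => some acc
  | b :: rest, acc =>
    match b with
    | 'A' => pvALoop rest (acc ++ "U")
    | 'U' => pvALoop rest (acc ++ "(A|G)")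
    | 'C' => pvALoop rest (acc ++ "G")
    | 'G' => pvALoop rest (acc ++ "(C|U)")
    | _ => none

def reverse_complement_regex (seq : String) : Option String :=
  pvALoop seq.toList.reverse ""

-- ===== PORT B =====
-- B: COMP dict (single-base strings as keys); divide and conquer on halves, combined as right + left.
def pvCOMP : PySem.Dict String String :=
  PySem.Dict.ofList [("A", "U"), ("U", "(A|G)"), ("C", "G"), ("G", "(C|U)")]

-- termination facts for the two slices (cited by name in decreasing_by)
lemma pv_len_take (s : String) (m : Nat) :
    (PySem.Str.slice s none (some (m : Int))).length = min m s.length := by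
  have h : (PySem.Str.slice s none (some (m : Int))).toList = s.toList.take m := by
    simp [PySem.List.slice_to_natCast]
  simp only [← String.length_toList, h]
  simp

lemma pv_len_drop (s : String) (m : Nat) :
    (PySem.Str.slice s (some (m : Int)) none).length = s.length - m := by
  have h : (PySem.Str.slice s (some (m : Int)) none).toList = s.toList.drop m := by
    simp [PySem.List.slice_from_natCast]
  simp only [← String.length_toList, h]
  simp

set_option maxHeartbeats 1000000 in
def reverse_complement_regex_alt (seq : String) : Option String :=
  if seq.length = 0 then some ""
  else if seq.length = 1 then pvCOMP.get? seq
  else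
    -- m = len(seq) // 2, inlined
    match reverse_complement_regex_alt (PySem.Str.slice seq none (some ((seq.length / 2 : Nat) : Int))),
          reverse_complement_regex_alt (PySem.Str.slice seq (some ((seq.length / 2 : Nat) : Int)) none) with
    | some left, some right => some (right ++ left)
    | _, _ => none
termination_by seq.length
decreasing_by
  · have := pv_len_take seq (seq.length / 2); omega
  · have := pv_len_drop seq (seq.length / 2); omega

-- ===== PRECONDITION & SPEC =====
def Spec_reverse_complement_regex (seq : String) (out : Option String) : Prop := out = reverse_complement_regex_alt seq
instance (seq : String) (out : Option String) : Decidable (Spec_reverse_complement_regex seq out) := by unfold Spec_reverse_complement_regex; infer_instance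

-- ===== CLAIM (what is proved, stated in full; the proofs are below) =====
def Claim_equal_reverse_complement_regex : Prop := ∀ (seq : String), Dom_reverse_complement_regex seq → Spec_reverse_complement_regex seq (reverse_complement_regex seq)

-- ===== LEMMAS AND PROOFS =====
def pvComp : Char → Option String
  | 'A' => some "U"
  | 'U' => some "(A|G)"
  | 'C' => some "G"
  | 'G' => some "(C|U)"
  | _ => none

def pvSpec (l : List Char) : Option String :=
  (l.mapM pvComp).map (fun ps => String.join ps)

lemma pv_foldl_append (l : List String) (a b : String) :
    List.foldl (fun r t => r ++ t) (a ++ b) l = a ++ List.foldl (fun r t => r ++ t) b l := by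
  induction l generalizing b with
  | nil => simp
  | cons s rest ih => simp [List.foldl, String.append_assoc, ih]

lemma pv_join_cons (s : String) (l : List String) :
    String.join (s :: l) = s ++ String.join l := by
  simp [String.join, List.foldl]
  have := pv_foldl_append l s ""
  simpa using this

lemma pv_join_append (a b : List String) :
    String.join (a ++ b) = String.join a ++ String.join b := by
  induction a with
  | nil => simp [String.join]
  | cons s rest ih => simp [pv_join_cons, ih, String.append_assoc]

lemma pvALoop_eq (l : List Char) (acc : String) :
    pvALoop l acc = (l.mapM pvComp).map (fun ps => acc ++ String.join ps) := by
  induction l generalizing acc with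
  | nil => simp [pvALoop, String.join]
  | cons b rest ih =>
    by_cases hA : b = 'A'
    · subst hA
      simp [pvALoop, ih, List.mapM_cons, pvComp]
      cases rest.mapM pvComp <;> simp [pv_join_cons, String.append_assoc]
    · by_cases hU : b = 'U'
      · subst hU
        simp [pvALoop, ih, List.mapM_cons, pvComp]
        cases rest.mapM pvComp <;> simp [pv_join_cons, String.append_assoc]
      · by_cases hC : b = 'C'
        · subst hC
          simp [pvALoop, ih, List.mapM_cons, pvComp]
          cases rest.mapM pvComp <;> simp [pv_join_cons, String.append_assoc]
        · by_cases hG : b = 'G'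
          · subst hG
            simp [pvALoop, ih, List.mapM_cons, pvComp]
            cases rest.mapM pvComp <;> simp [pv_join_cons, String.append_assoc]
          · have hnone : pvALoop (b :: rest) acc = none := by
              unfold pvALoop
              split
              all_goals first | rfl | (exfalso; simp_all)
            have hcomp : pvComp b = none := by
              unfold pvComp
              split
              all_goals first | rfl | (exfalso; simp_all)
            simp [hnone, List.mapM_cons, hcomp]

lemma pvSpec_append (a b : List Char) :
    pvSpec (a ++ b) =
      match pvSpec a, pvSpec b with
      | some x, some y => some (x ++ y)
      | _, _ => none := by
  unfold pvSpec
  rw [List.mapM_append]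
  cases a.mapM pvComp <;> cases b.mapM pvComp <;> simp [pv_join_append]

lemma pvCOMP_get_single (c : Char) :
    pvCOMP.get? (String.ofList [c]) = pvComp c := by
  by_cases hA : c = 'A'
  · subst hA; decide
  · by_cases hU : c = 'U'
    · subst hU; decide
    · by_cases hC : c = 'C'
      · subst hC; decide
      · by_cases hG : c = 'G'
        · subst hG; decide
        · have hcomp : pvComp c = none := by
            unfold pvComp
            split
            all_goals first | rfl | (exfalso; simp_all)
          rw [hcomp]
          simp [pvCOMP, PySem.Dict.ofList, PySem.Dict.get?, PySem.Dict.update,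
                PySem.Dict.insert, PySem.Dict.empty]
          refine ⟨fun he => hA ?_, fun he => hU ?_, fun he => hC ?_, fun he => hG ?_⟩ <;>
            simpa using (congrArg String.toList he.symm)

lemma pv_take_toList (s : String) (m : Nat) :
    (PySem.Str.slice s none (some (m : Int))).toList = s.toList.take m := by
  simp [PySem.List.slice_to_natCast]

lemma pv_drop_toList (s : String) (m : Nat) :
    (PySem.Str.slice s (some (m : Int)) none).toList = s.toList.drop m := by
  simp [PySem.List.slice_from_natCast]

lemma alt_eq_spec_bounded : ∀ (n : Nat) (seq : String), seq.length ≤ n →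
    reverse_complement_regex_alt seq = pvSpec seq.toList.reverse := by
  intro n
  induction n with
  | zero =>
    intro seq hle
    have h0 : seq.length = 0 := Nat.le_zero.mp hle
    have hnil : seq.toList = [] := by
      have := String.length_eq_zero_iff.mp h0
      simp [this]
    rw [reverse_complement_regex_alt]
    simp [h0, hnil, pvSpec, String.join]
  | succ n ih =>
    intro seq hle
    by_cases h0 : seq.length = 0
    · have hnil : seq.toList = [] := by
        have := String.length_eq_zero_iff.mp h0
        simp [this]
      rw [reverse_complement_regex_alt]
      simp [h0, hnil, pvSpec, String.join]
    · by_cases h1 : seq.length = 1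
      · obtain ⟨c, hc⟩ := List.length_eq_one_iff.mp (by simpa using h1)
        have hs : seq = String.ofList [c] := by
          rw [← hc]; exact String.ofList_toList.symm
        rw [reverse_complement_regex_alt]
        rw [if_neg h0, if_pos h1]
        rw [hs, pvCOMP_get_single]
        simp [pvSpec, List.mapM_cons]
        cases pvComp c <;> simp [String.join]
      · have hlenL : (PySem.Str.slice seq none (some ((seq.length / 2 : Nat) : Int))).length ≤ n := by
          have := pv_len_take seq (seq.length / 2); omega
        have hlenR : (PySem.Str.slice seq (some ((seq.length / 2 : Nat) : Int)) none).length ≤ n := by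
          have := pv_len_drop seq (seq.length / 2); omega
        rw [reverse_complement_regex_alt]
        rw [if_neg h0, if_neg h1]
        rw [ih _ hlenL, ih _ hlenR, pv_take_toList, pv_drop_toList]
        have hsplit : seq.toList.reverse
            = (seq.toList.drop (seq.length / 2)).reverse ++ (seq.toList.take (seq.length / 2)).reverse := by
          rw [← List.reverse_append, List.take_append_drop]
        rw [hsplit, pvSpec_append]
        cases pvSpec (seq.toList.take (seq.length / 2)).reverse <;>
          cases pvSpec (seq.toList.drop (seq.length / 2)).reverse <;> simp

lemma alt_eq_spec (seq : String) :
    reverse_complement_regex_alt seq = pvSpec seq.toList.reverse :=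
  alt_eq_spec_bounded seq.length seq le_rfl

-- ===== VERDICT (by name: the statement is the Claim_ definition above) =====
theorem reverse_complement_regex_spec : Claim_equal_reverse_complement_regex := by
  intro seq _
  unfold Spec_reverse_complement_regex reverse_complement_regex
  rw [alt_eq_spec, pvALoop_eq]
  unfold pvSpec
  cases seq.toList.reverse.mapM pvComp <;> simp
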